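-- pv_equiv track=rewrite | github.com/neochen1991/multi-agent-cli | backend/app/services/agent_tool_context_service.py | _build_metric_causal_chain
-- ===== SOURCE A (Python) =====
-- from typing import Any, Dict, Iterable, List, Optional
--
-- def _build_metric_causal_chain(signals: List[Dict[str, Any]]) -> List[Dict[str, Any]]:
--     chain: List[Dict[str, Any]] = []
--     for item in signals:
--         metric = str(item.get("metric") or "").strip().lower()
--         label = str(item.get("label") or metric).strip()
--         value = str(item.get("value") or "").strip()
--         snippet = str(item.get("snippet") or "").strip()
--         stage = ""
--         rationale = ""
--         if metric in {"cpu", "threads", "memory", "gc"}: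
--             stage = "resource_pressure"
--             rationale = "资源指标先行异常，通常代表系统已进入压力阶段。"
--         elif metric in {"db_conn", "hikari_pending", "pool", "queue"}:
--             stage = "capacity_saturation"
--             rationale = "连接/队列类指标打满，说明容量瓶颈已形成。"
--         elif metric in {"error_rate", "latency", "p99", "availability", "5xx"}:
--             stage = "user_visible_failure"
--             rationale = "错误率或延迟已上升到用户可感知层。"
--         if not stage:
--             continue
--         chain.append(
--             {
--                 "stage": stage,
--                 "metric": metric,
--                 "label": label,
--                 "value": value,
--                 "snippet": snippet[:180],
--                 "rationale": rationale,
--             }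
--         )
--     if not chain:
--         return []
--     stage_order = {"resource_pressure": 1, "capacity_saturation": 2, "user_visible_failure": 3}
--     chain.sort(key=lambda item: (stage_order.get(str(item.get("stage") or ""), 99), str(item.get("metric") or "")))
--     deduped: List[Dict[str, Any]] = []
--     seen = set()
--     for item in chain:
--         key = f"{item.get('stage')}|{item.get('metric')}"
--         if key in seen:
--             continue
--         seen.add(key)
--         deduped.append(item)
--     return deduped[:8]
-- ===== SOURCE B (Python) =====
-- # B: single pass that classifies via one lookup table and dedupes while building
-- # (first occurrence per (stage, metric) wins), then sorts the surviving keys once.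
-- _INFO = {
--     "cpu": (1, "resource_pressure", "资源指标先行异常，通常代表系统已进入压力阶段。"),
--     "threads": (1, "resource_pressure", "资源指标先行异常，通常代表系统已进入压力阶段。"),
--     "memory": (1, "resource_pressure", "资源指标先行异常，通常代表系统已进入压力阶段。"),
--     "gc": (1, "resource_pressure", "资源指标先行异常，通常代表系统已进入压力阶段。"),
--     "db_conn": (2, "capacity_saturation", "连接/队列类指标打满，说明容量瓶颈已形成。"),
--     "hikari_pending": (2, "capacity_saturation", "连接/队列类指标打满，说明容量瓶颈已形成。"),
--     "pool": (2, "capacity_saturation", "连接/队列类指标打满，说明容量瓶颈已形成。"),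
--     "queue": (2, "capacity_saturation", "连接/队列类指标打满，说明容量瓶颈已形成。"),
--     "error_rate": (3, "user_visible_failure", "错误率或延迟已上升到用户可感知层。"),
--     "latency": (3, "user_visible_failure", "错误率或延迟已上升到用户可感知层。"),
--     "p99": (3, "user_visible_failure", "错误率或延迟已上升到用户可感知层。"),
--     "availability": (3, "user_visible_failure", "错误率或延迟已上升到用户可感知层。"),
--     "5xx": (3, "user_visible_failure", "错误率或延迟已上升到用户可感知层。"),
-- }
--
--
-- def _build_metric_causal_chain(signals):
--     chosen = {}
--     for item in signals:
--         metric = str(item.get("metric") or "").strip().lower()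
--         info = _INFO.get(metric)
--         if info is None:
--             continue
--         order, stage, rationale = info
--         key = (order, metric)
--         if key in chosen:
--             continue
--         label = str(item.get("label") or metric).strip()
--         value = str(item.get("value") or "").strip()
--         snippet = str(item.get("snippet") or "").strip()
--         chosen[key] = {
--             "stage": stage,
--             "metric": metric,
--             "label": label,
--             "value": value,
--             "snippet": snippet[:180],
--             "rationale": rationale,
--         }
--     return [chosen[k] for k in sorted(chosen)][:8]
-- ===== Notes on version B (the rewrite author's own statement) =====
-- stated objective: simpler
-- what changed: A builds every classified entry, stably sorts the whole list, then dedupes the sorted list with a seen-set; B classifies via one lookup table and dedupes while building (first (stage, metric) occurrence wins, so the whole dedupe pass over the sorted list disappears), then sorts only the surviving keys once and reads the entries back.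
import Mathlib
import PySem

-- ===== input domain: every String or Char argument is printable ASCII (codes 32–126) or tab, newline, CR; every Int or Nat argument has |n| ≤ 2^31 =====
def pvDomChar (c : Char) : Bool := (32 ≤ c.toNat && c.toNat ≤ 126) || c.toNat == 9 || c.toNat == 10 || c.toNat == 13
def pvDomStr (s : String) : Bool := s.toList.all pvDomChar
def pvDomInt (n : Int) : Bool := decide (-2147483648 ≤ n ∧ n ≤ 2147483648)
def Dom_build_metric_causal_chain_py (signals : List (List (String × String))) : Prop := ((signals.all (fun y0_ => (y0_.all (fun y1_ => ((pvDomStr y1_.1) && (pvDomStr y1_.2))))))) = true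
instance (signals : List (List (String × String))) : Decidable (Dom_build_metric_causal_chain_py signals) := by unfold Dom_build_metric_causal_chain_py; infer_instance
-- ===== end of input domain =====

-- B replaces A's build-everything → sort → dedupe pipeline by a single classifying
-- pass that dedupes while building (first (stage, metric) wins) and then sorts only
-- the surviving keys once; objective: simpler.

-- ===== PORT A =====
-- A-side helpers: the stage_order dict and Python's f-string rendering of an Optional[str]
def pvStageOrder : PySem.Dict String Int :=
  ⟨[("resource_pressure", 1), ("capacity_saturation", 2), ("user_visible_failure", 3)]⟩

def pvFmt : Option String → List Char
  | some s => s.toList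
  | none => "None".toList

def build_metric_causal_chain_py (signals : List (List (String × String))) : List (List (String × String)) :=
  let chain := signals.foldl (fun chain item =>
    let metric := PySem.Str.lower (PySem.Str.strip (PySem.Dict.getD ⟨item⟩ "metric" ""))
    let lraw := PySem.Dict.getD ⟨item⟩ "label" ""
    let label := PySem.Str.strip (if lraw = "" then metric else lraw)
    let value := PySem.Str.strip (PySem.Dict.getD ⟨item⟩ "value" "")
    let snippet := PySem.Str.strip (PySem.Dict.getD ⟨item⟩ "snippet" "")
    let sr : String × String :=
      if ["cpu", "threads", "memory", "gc"].contains metric then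
        ("resource_pressure", "资源指标先行异常，通常代表系统已进入压力阶段。")
      else if ["db_conn", "hikari_pending", "pool", "queue"].contains metric then
        ("capacity_saturation", "连接/队列类指标打满，说明容量瓶颈已形成。")
      else if ["error_rate", "latency", "p99", "availability", "5xx"].contains metric then
        ("user_visible_failure", "错误率或延迟已上升到用户可感知层。")
      else ("", "")
    if sr.1 = "" then chain
    else chain ++ [[("stage", sr.1), ("metric", metric), ("label", label), ("value", value),
                    ("snippet", PySem.Str.slice snippet none (some 180)), ("rationale", sr.2)]]) []
  if chain = [] then []
  else
    let sortedChain := PySem.List.sorted2 chain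
      (fun it => PySem.Dict.getD pvStageOrder (PySem.Dict.getD ⟨it⟩ "stage" "") 99)
      (fun it => PySem.Dict.getD ⟨it⟩ "metric" "")
    let deduped := (sortedChain.foldl
      (fun (st : List (List (String × String)) × PySem.Set (List Char)) it =>
        let key := pvFmt (PySem.Dict.get? ⟨it⟩ "stage") ++ '|' :: pvFmt (PySem.Dict.get? ⟨it⟩ "metric")
        if PySem.Set.contains st.2 key then st
        else (st.1 ++ [it], PySem.Set.add st.2 key)) ([], PySem.Set.empty)).1
    PySem.List.slice deduped none (some 8)

-- ===== PORT B =====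
-- B-side helper: the module-level _INFO lookup table of Source B
def pvInfo : PySem.Dict String (Int × String × String) :=
  ⟨[("cpu", (1, "resource_pressure", "资源指标先行异常，通常代表系统已进入压力阶段。")),
    ("threads", (1, "resource_pressure", "资源指标先行异常，通常代表系统已进入压力阶段。")),
    ("memory", (1, "resource_pressure", "资源指标先行异常，通常代表系统已进入压力阶段。")),
    ("gc", (1, "resource_pressure", "资源指标先行异常，通常代表系统已进入压力阶段。")),
    ("db_conn", (2, "capacity_saturation", "连接/队列类指标打满，说明容量瓶颈已形成。")),
    ("hikari_pending", (2, "capacity_saturation", "连接/队列类指标打满，说明容量瓶颈已形成。")),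
    ("pool", (2, "capacity_saturation", "连接/队列类指标打满，说明容量瓶颈已形成。")),
    ("queue", (2, "capacity_saturation", "连接/队列类指标打满，说明容量瓶颈已形成。")),
    ("error_rate", (3, "user_visible_failure", "错误率或延迟已上升到用户可感知层。")),
    ("latency", (3, "user_visible_failure", "错误率或延迟已上升到用户可感知层。")),
    ("p99", (3, "user_visible_failure", "错误率或延迟已上升到用户可感知层。")),
    ("availability", (3, "user_visible_failure", "错误率或延迟已上升到用户可感知层。")),
    ("5xx", (3, "user_visible_failure", "错误率或延迟已上升到用户可感知层。"))]⟩

def build_metric_causal_chain_py_alt (signals : List (List (String × String))) : List (List (String × String)) :=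
  let chosen : PySem.Dict (Int × String) (List (String × String)) := signals.foldl (fun chosen item =>
    let metric := PySem.Str.lower (PySem.Str.strip (PySem.Dict.getD ⟨item⟩ "metric" ""))
    match PySem.Dict.get? pvInfo metric with
    | none => chosen
    | some (ord, stage, rationale) =>
      let key := (ord, metric)
      if PySem.Dict.contains chosen key then chosen
      else
        let lraw := PySem.Dict.getD ⟨item⟩ "label" ""
        let label := PySem.Str.strip (if lraw = "" then metric else lraw)
        let value := PySem.Str.strip (PySem.Dict.getD ⟨item⟩ "value" "")
        let snippet := PySem.Str.strip (PySem.Dict.getD ⟨item⟩ "snippet" "")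
        PySem.Dict.insert chosen key
          [("stage", stage), ("metric", metric), ("label", label), ("value", value),
           ("snippet", PySem.Str.slice snippet none (some 180)), ("rationale", rationale)]) PySem.Dict.empty
  PySem.List.slice
    ((PySem.List.sorted2 (PySem.Dict.keys chosen) (fun k => k.1) (fun k => k.2)).map
      (fun k => PySem.Dict.getD chosen k []))
    none (some 8)

-- ===== PRECONDITION & SPEC =====
def Spec_build_metric_causal_chain_py (signals : List (List (String × String))) (out : List (List (String × String))) : Prop := out = build_metric_causal_chain_py_alt signals
instance (signals : List (List (String × String))) (out : List (List (String × String))) : Decidable (Spec_build_metric_causal_chain_py signals out) := by unfold Spec_build_metric_causal_chain_py; infer_instance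

-- ===== CLAIM (what is proved, stated in full; the proofs are below) =====
def Claim_equal_build_metric_causal_chain_py : Prop := ∀ (signals : List (List (String × String))), Dom_build_metric_causal_chain_py signals → Spec_build_metric_causal_chain_py signals (build_metric_causal_chain_py signals)


-- ===== LEMMAS AND PROOFS =====

-- proof-side abbreviations
def pvMet (item : List (String × String)) : String :=
  PySem.Str.lower (PySem.Str.strip (PySem.Dict.getD ⟨item⟩ "metric" ""))

def pvMkE (item : List (String × String)) (stage rat : String) : List (String × String) :=
  [("stage", stage), ("metric", pvMet item),
   ("label", PySem.Str.strip (if PySem.Dict.getD ⟨item⟩ "label" "" = "" then pvMet item else PySem.Dict.getD ⟨item⟩ "label" "")),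
   ("value", PySem.Str.strip (PySem.Dict.getD ⟨item⟩ "value" "")),
   ("snippet", PySem.Str.slice (PySem.Str.strip (PySem.Dict.getD ⟨item⟩ "snippet" "")) none (some 180)),
   ("rationale", rat)]

def pvF (item : List (String × String)) : Option (List (String × String)) :=
  (PySem.Dict.get? pvInfo (pvMet item)).map (fun osr => pvMkE item osr.2.1 osr.2.2)

def pvKey1 (e : List (String × String)) : Int :=
  PySem.Dict.getD pvStageOrder (PySem.Dict.getD ⟨e⟩ "stage" "") 99
def pvKey2 (e : List (String × String)) : String := PySem.Dict.getD ⟨e⟩ "metric" ""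
def pvK (e : List (String × String)) : Int × String := (pvKey1 e, pvKey2 e)
def pvLex (e : List (String × String)) : Lex (Int × String) := toLex (pvK e)
def pvAKey (e : List (String × String)) : List Char :=
  pvFmt (PySem.Dict.get? ⟨e⟩ "stage") ++ '|' :: pvFmt (PySem.Dict.get? ⟨e⟩ "metric")

def pvDD {A K : Type} [DecidableEq K] (f : A → K) : List A → List K → List A
  | [], _ => []
  | x :: xs, seen => if f x ∈ seen then pvDD f xs seen else x :: pvDD f xs (f x :: seen)

def pvInv (e : List (String × String)) : Prop :=
  ∃ m l v n o s r, PySem.Dict.get? pvInfo m = some (o, s, r) ∧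
    e = [("stage", s), ("metric", m), ("label", l), ("value", v), ("snippet", n), ("rationale", r)]

lemma pvDD_cons_mem {A K : Type} [DecidableEq K] {f : A → K} {x : A} {xs : List A} {s : List K}
    (hx : f x ∈ s) : pvDD f (x :: xs) s = pvDD f xs s := by
  simp [pvDD, hx]

lemma pvDD_cons_not_mem {A K : Type} [DecidableEq K] {f : A → K} {x : A} {xs : List A} {s : List K}
    (hx : f x ∉ s) : pvDD f (x :: xs) s = x :: pvDD f xs (f x :: s) := by
  simp [pvDD, hx]

-- facts about the lookup table
lemma pvInfo_mem {m : String} {o : Int} {s r : String} (h : PySem.Dict.get? pvInfo m = some (o, s, r)) :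
    ((o, s) = (1, "resource_pressure") ∨ (o, s) = (2, "capacity_saturation") ∨ (o, s) = (3, "user_visible_failure")) ∧
      PySem.Dict.getD pvStageOrder s 99 = o := by
  rw [PySem.Dict.get?_eq_some_iff_mem_items _ _ _ (by decide)] at h
  simp [pvInfo] at h
  rcases h with ⟨_, h⟩ | ⟨_, h⟩ | ⟨_, h⟩ | ⟨_, h⟩ | ⟨_, h⟩ | ⟨_, h⟩ | ⟨_, h⟩ | ⟨_, h⟩ | ⟨_, h⟩ | ⟨_, h⟩ | ⟨_, h⟩ | ⟨_, h⟩ | ⟨_, h⟩ <;>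
    (obtain ⟨h1, h2, h3⟩ := h; subst h1; subst h2; exact ⟨by simp, by decide⟩)

lemma pvInfo_get_eq (m : String) : PySem.Dict.get? pvInfo m =
    (if ["cpu", "threads", "memory", "gc"].contains m then
        some ((1 : Int), "resource_pressure", "资源指标先行异常，通常代表系统已进入压力阶段。")
      else if ["db_conn", "hikari_pending", "pool", "queue"].contains m then
        some ((2 : Int), "capacity_saturation", "连接/队列类指标打满，说明容量瓶颈已形成。")
      else if ["error_rate", "latency", "p99", "availability", "5xx"].contains m then
        some ((3 : Int), "user_visible_failure", "错误率或延迟已上升到用户可感知层。")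
      else none) := by
  by_cases h1 : m = "cpu"; · subst h1; decide
  by_cases h2 : m = "threads"; · subst h2; decide
  by_cases h3 : m = "memory"; · subst h3; decide
  by_cases h4 : m = "gc"; · subst h4; decide
  by_cases h5 : m = "db_conn"; · subst h5; decide
  by_cases h6 : m = "hikari_pending"; · subst h6; decide
  by_cases h7 : m = "pool"; · subst h7; decide
  by_cases h8 : m = "queue"; · subst h8; decide
  by_cases h9 : m = "error_rate"; · subst h9; decide
  by_cases h10 : m = "latency"; · subst h10; decide
  by_cases h11 : m = "p99"; · subst h11; decide
  by_cases h12 : m = "availability"; · subst h12; decide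
  by_cases h13 : m = "5xx"; · subst h13; decide
  simp [pvInfo, PySem.Dict.get?, beq_iff_eq, List.contains_eq_mem,
    Ne.symm h1, Ne.symm h2, Ne.symm h3, Ne.symm h4, Ne.symm h5, Ne.symm h6, Ne.symm h7,
    Ne.symm h8, Ne.symm h9, Ne.symm h10, Ne.symm h11, Ne.symm h12, Ne.symm h13,
    h1, h2, h3, h4, h5, h6, h7, h8, h9, h10, h11, h12, h13]

-- lookups on a built entry
lemma pvGetD_field (s m l v n r : String) :
    PySem.Dict.getD (⟨[("stage", s), ("metric", m), ("label", l), ("value", v), ("snippet", n), ("rationale", r)]⟩ : PySem.Dict String String) "stage" "" = s ∧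
    PySem.Dict.getD (⟨[("stage", s), ("metric", m), ("label", l), ("value", v), ("snippet", n), ("rationale", r)]⟩ : PySem.Dict String String) "metric" "" = m ∧
    PySem.Dict.get? (⟨[("stage", s), ("metric", m), ("label", l), ("value", v), ("snippet", n), ("rationale", r)]⟩ : PySem.Dict String String) "stage" = some s ∧
    PySem.Dict.get? (⟨[("stage", s), ("metric", m), ("label", l), ("value", v), ("snippet", n), ("rationale", r)]⟩ : PySem.Dict String String) "metric" = some m := by
  refine ⟨?_, ?_, ?_, ?_⟩ <;> simp [PySem.Dict.getD, PySem.Dict.get?]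

lemma pvK_mkE {item : List (String × String)} {o : Int} {s r : String}
    (h : PySem.Dict.get? pvInfo (pvMet item) = some (o, s, r)) :
    pvK (pvMkE item s r) = (o, pvMet item) := by
  have h2 := (pvInfo_mem h).2
  simp [pvK, pvKey1, pvKey2, pvMkE, (pvGetD_field _ _ _ _ _ _).1, (pvGetD_field _ _ _ _ _ _).2.1, h2]

lemma pvInv_mkE {item : List (String × String)} {o : Int} {s r : String}
    (h : PySem.Dict.get? pvInfo (pvMet item) = some (o, s, r)) : pvInv (pvMkE item s r) :=
  ⟨pvMet item, _, _, _, o, s, r, h, rfl⟩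

-- A's building loop builds exactly filterMap pvF
lemma pvChainEq (signals : List (List (String × String))) (acc : List (List (String × String))) :
    signals.foldl (fun chain item =>
      let metric := PySem.Str.lower (PySem.Str.strip (PySem.Dict.getD ⟨item⟩ "metric" ""))
      let lraw := PySem.Dict.getD ⟨item⟩ "label" ""
      let label := PySem.Str.strip (if lraw = "" then metric else lraw)
      let value := PySem.Str.strip (PySem.Dict.getD ⟨item⟩ "value" "")
      let snippet := PySem.Str.strip (PySem.Dict.getD ⟨item⟩ "snippet" "")
      let sr : String × String :=
        if ["cpu", "threads", "memory", "gc"].contains metric then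
          ("resource_pressure", "资源指标先行异常，通常代表系统已进入压力阶段。")
        else if ["db_conn", "hikari_pending", "pool", "queue"].contains metric then
          ("capacity_saturation", "连接/队列类指标打满，说明容量瓶颈已形成。")
        else if ["error_rate", "latency", "p99", "availability", "5xx"].contains metric then
          ("user_visible_failure", "错误率或延迟已上升到用户可感知层。")
        else ("", "")
      if sr.1 = "" then chain
      else chain ++ [[("stage", sr.1), ("metric", metric), ("label", label), ("value", value),
                      ("snippet", PySem.Str.slice snippet none (some 180)), ("rationale", sr.2)]]) acc
      = acc ++ signals.filterMap pvF := by
  induction signals generalizing acc with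
  | nil => simp
  | cons item rest ih =>
    rw [List.foldl_cons, ih, List.filterMap_cons, pvF, pvInfo_get_eq]
    simp only [pvMet, pvMkE]
    split_ifs with c1 c2 c3 <;> simp_all

lemma pvInv_of_mem {signals : List (List (String × String))} {e : List (String × String)}
    (h : e ∈ signals.filterMap pvF) : pvInv e := by
  rw [List.mem_filterMap] at h
  obtain ⟨item, _, hf⟩ := h
  rw [pvF] at hf
  cases hg : PySem.Dict.get? pvInfo (pvMet item) with
  | none => rw [hg] at hf; simp at hf
  | some osr =>
    rw [hg] at hf; obtain ⟨o, s, r⟩ := osr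
    simp only [Option.map_some] at hf
    injection hf with hf
    exact hf ▸ pvInv_mkE hg

-- pvDD basics
lemma pvDD_seen_congr {A K : Type} [DecidableEq K] (f : A → K) (l : List A) {s₁ s₂ : List K}
    (h : ∀ k, k ∈ s₁ ↔ k ∈ s₂) : pvDD f l s₁ = pvDD f l s₂ := by
  induction l generalizing s₁ s₂ with
  | nil => rfl
  | cons x xs ih =>
    by_cases hx : f x ∈ s₁
    · rw [pvDD_cons_mem hx, pvDD_cons_mem ((h _).mp hx), ih h]
    · rw [pvDD_cons_not_mem hx, pvDD_cons_not_mem (fun c => hx ((h _).mpr c))]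
      exact congrArg (x :: ·) (ih (fun k => by rw [List.mem_cons, List.mem_cons]; exact or_congr Iff.rfl (h k)))

lemma pvDD_sublist {A K : Type} [DecidableEq K] (f : A → K) (l : List A) (s : List K) :
    (pvDD f l s).Sublist l := by
  induction l generalizing s with
  | nil => simp [pvDD]
  | cons x xs ih =>
    by_cases hx : f x ∈ s
    · rw [pvDD_cons_mem hx]; exact (ih s).cons x
    · rw [pvDD_cons_not_mem hx]; exact (ih (f x :: s)).cons₂ x

lemma pvDD_not_mem_seen {A K : Type} [DecidableEq K] {f : A → K} {l : List A} {s : List K} {e : A}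
    (h : e ∈ pvDD f l s) : f e ∉ s := by
  induction l generalizing s with
  | nil => simp [pvDD] at h
  | cons x xs ih =>
    by_cases hx : f x ∈ s
    · rw [pvDD_cons_mem hx] at h; exact ih h
    · rw [pvDD_cons_not_mem hx] at h
      rcases List.mem_cons.mp h with rfl | h
      · exact hx
      · intro c; exact ih h (List.mem_cons_of_mem _ c)

lemma pvDD_pairwise_ne {A K : Type} [DecidableEq K] (f : A → K) (l : List A) (s : List K) :
    (pvDD f l s).Pairwise (fun a b => f a ≠ f b) := by
  induction l generalizing s with
  | nil => simp [pvDD]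
  | cons x xs ih =>
    by_cases hx : f x ∈ s
    · rw [pvDD_cons_mem hx]; exact ih s
    · rw [pvDD_cons_not_mem hx]
      refine List.Pairwise.cons (fun b hb => ?_) (ih _)
      have := pvDD_not_mem_seen hb
      intro c; exact this (c ▸ List.mem_cons_self)

lemma pvDD_nodup {A K : Type} [DecidableEq K] (f : A → K) (l : List A) (s : List K) :
    (pvDD f l s).Nodup :=
  (pvDD_pairwise_ne f l s).imp (fun h c => h (congrArg f c))

lemma pvMem_pvDD {A K : Type} [DecidableEq K] (f : A → K) (l : List A) (s : List K) (e : A) :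
    e ∈ pvDD f l s ↔ f e ∉ s ∧ (l.filter (fun x => decide (f x = f e))).head? = some e := by
  induction l generalizing s with
  | nil => simp [pvDD]
  | cons x xs ih =>
    rw [List.filter_cons]
    by_cases hfe : f x = f e
    · rw [if_pos (decide_eq_true hfe), List.head?_cons]
      by_cases hx : f x ∈ s
      · rw [pvDD_cons_mem hx]
        constructor
        · intro h; exact ((((ih s).mp h).1) (hfe ▸ hx)).elim
        · rintro ⟨h1, _⟩; exact (h1 (hfe ▸ hx)).elim
      · rw [pvDD_cons_not_mem hx]
        constructor
        · intro h
          rcases List.mem_cons.mp h with rfl | h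
          · exact ⟨fun c => hx (hfe ▸ c), rfl⟩
          · exact ((((ih _).mp h).1) (hfe ▸ List.mem_cons_self)).elim
        · rintro ⟨_, h2⟩
          injection h2 with h2
          exact List.mem_cons.mpr (Or.inl h2.symm)
    · rw [if_neg (show ¬(decide (f x = f e) = true) by simp [hfe])]
      by_cases hx : f x ∈ s
      · rw [pvDD_cons_mem hx, ih]
      · rw [pvDD_cons_not_mem hx]
        constructor
        · intro h
          rcases List.mem_cons.mp h with rfl | h
          · exact (hfe rfl).elim
          · have h' := (ih _).mp h
            exact ⟨fun c => h'.1 (List.mem_cons_of_mem _ c), h'.2⟩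
        · rintro ⟨h1, h2⟩
          refine List.mem_cons_of_mem _ ((ih _).mpr ⟨?_, h2⟩)
          intro c
          rcases List.mem_cons.mp c with c | c
          · exact hfe c.symm
          · exact h1 c

lemma pvDD_key_iff {A K1 K2 : Type} [DecidableEq K1] [DecidableEq K2] {f : A → K1} {g : A → K2}
    (l : List A) (prev : List A)
    (h : ∀ a b, (a ∈ l ∨ a ∈ prev) → (b ∈ l ∨ b ∈ prev) → (f a = f b ↔ g a = g b)) :
    pvDD f l (prev.map f) = pvDD g l (prev.map g) := by
  induction l generalizing prev with
  | nil => rfl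
  | cons x xs ih =>
    have hmem : f x ∈ prev.map f ↔ g x ∈ prev.map g := by
      simp only [List.mem_map]
      constructor
      · rintro ⟨p, hp, he⟩
        exact ⟨p, hp, (h p x (Or.inr hp) (Or.inl List.mem_cons_self)).mp he⟩
      · rintro ⟨p, hp, he⟩
        exact ⟨p, hp, (h p x (Or.inr hp) (Or.inl List.mem_cons_self)).mpr he⟩
    by_cases hx : f x ∈ prev.map f
    · rw [pvDD_cons_mem hx, pvDD_cons_mem (hmem.mp hx)]
      exact ih prev (fun a b ha hb =>
        h a b (ha.imp (List.mem_cons_of_mem x) id) (hb.imp (List.mem_cons_of_mem x) id))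
    · rw [pvDD_cons_not_mem hx, pvDD_cons_not_mem (fun c => hx (hmem.mpr c))]
      rw [show f x :: prev.map f = (x :: prev).map f from rfl,
          show g x :: prev.map g = (x :: prev).map g from rfl]
      rw [ih (x :: prev) (fun a b ha hb => h a b ?_ ?_)]
      · rcases ha with ha | ha
        · exact Or.inl (List.mem_cons_of_mem x ha)
        · rcases List.mem_cons.mp ha with rfl | ha
          · exact Or.inl List.mem_cons_self
          · exact Or.inr ha
      · rcases hb with hb | hb
        · exact Or.inl (List.mem_cons_of_mem x hb)
        · rcases List.mem_cons.mp hb with rfl | hb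
          · exact Or.inl List.mem_cons_self
          · exact Or.inr hb



-- B's loop over signals = first-occurrence dict over filterMap pvF
lemma pvChosenEq (signals : List (List (String × String))) (d : PySem.Dict (Int × String) (List (String × String))) :
    (signals.foldl (fun chosen item =>
      let metric := PySem.Str.lower (PySem.Str.strip (PySem.Dict.getD ⟨item⟩ "metric" ""))
      match PySem.Dict.get? pvInfo metric with
      | none => chosen
      | some (ord, stage, rationale) =>
        let key := (ord, metric)
        if PySem.Dict.contains chosen key then chosen
        else
          let lraw := PySem.Dict.getD ⟨item⟩ "label" ""
          let label := PySem.Str.strip (if lraw = "" then metric else lraw)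
          let value := PySem.Str.strip (PySem.Dict.getD ⟨item⟩ "value" "")
          let snippet := PySem.Str.strip (PySem.Dict.getD ⟨item⟩ "snippet" "")
          PySem.Dict.insert chosen key
            [("stage", stage), ("metric", metric), ("label", label), ("value", value),
             ("snippet", PySem.Str.slice snippet none (some 180)), ("rationale", rationale)]) d).items
    = d.items ++ (pvDD pvK (signals.filterMap pvF) d.keys).map (fun e => (pvK e, e)) := by
  induction signals generalizing d with
  | nil => simp [pvDD]
  | cons item rest ih =>
    rw [List.foldl_cons, ih, List.filterMap_cons]
    cases hg : PySem.Dict.get? pvInfo (pvMet item) with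
    | none =>
      have hf : pvF item = none := by rw [pvF, hg]; rfl
      simp only [pvMet] at hg
      simp only [hg, hf]
    | some osr =>
      obtain ⟨o, s, r⟩ := osr
      have hf : pvF item = some (pvMkE item s r) := by rw [pvF, hg]; rfl
      have hk := pvK_mkE hg
      simp only [pvMet] at hg
      by_cases hc : PySem.Dict.contains d (o, PySem.Str.lower (PySem.Str.strip (PySem.Dict.getD ⟨item⟩ "metric" ""))) = true
      · have hmem : pvK (pvMkE item s r) ∈ d.keys := by
          rw [hk]; exact (PySem.Dict.contains_iff_mem_keys _ _).mp hc
        simp only [hg, hf, hc, if_true, pvDD_cons_mem hmem]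
      · have hmem : pvK (pvMkE item s r) ∉ d.keys := by
          rw [hk]; intro c; exact hc ((PySem.Dict.contains_iff_mem_keys _ _).mpr c)
        have hc' : PySem.Dict.contains d (o, PySem.Str.lower (PySem.Str.strip (PySem.Dict.getD ⟨item⟩ "metric" ""))) = false :=
          Bool.not_eq_true _ ▸ hc
        simp only [hg, hf, hc', Bool.false_eq_true, if_false, pvDD_cons_not_mem hmem]
        rw [PySem.Dict.items_insert_of_not_contains _ _ hc',
            PySem.Dict.keys_insert_of_not_contains _ _ hc']
        rw [pvDD_seen_congr pvK _ (s₂ := pvK (pvMkE item s r) :: d.keys)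
            (fun k => by
              simp only [List.mem_append, List.mem_cons, List.not_mem_nil, or_false, hk, pvMet]
              exact or_comm)]
        have hk' := hk
        simp only [pvMkE, pvMet] at hk'
        simp [pvMkE, pvMet, List.append_assoc, hk']

-- A's dedupe loop is pvDD by the f-string key
lemma pvSetContains (s : PySem.Set (List Char)) (k : List Char) :
    PySem.Set.contains s k = true ↔ k ∈ s := by
  simp [PySem.Set.contains]

lemma pvDedupEq (l : List (List (String × String))) (acc : List (List (String × String)))
    (seen : PySem.Set (List Char)) :
    (l.foldl (fun (st : List (List (String × String)) × PySem.Set (List Char)) it =>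
        let key := pvFmt (PySem.Dict.get? ⟨it⟩ "stage") ++ '|' :: pvFmt (PySem.Dict.get? ⟨it⟩ "metric")
        if PySem.Set.contains st.2 key then st
        else (st.1 ++ [it], PySem.Set.add st.2 key)) (acc, seen)).1
    = acc ++ pvDD pvAKey l seen := by
  induction l generalizing acc seen with
  | nil => simp [pvDD]
  | cons x xs ih =>
    rw [List.foldl_cons]
    by_cases hx : pvAKey x ∈ seen
    · have hc : PySem.Set.contains seen (pvFmt (PySem.Dict.get? ⟨x⟩ "stage") ++ '|' :: pvFmt (PySem.Dict.get? ⟨x⟩ "metric")) = true :=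
        (pvSetContains _ _).mpr hx
      simp only [hc, if_true, ih, pvDD_cons_mem hx]
    · have hc : PySem.Set.contains seen (pvFmt (PySem.Dict.get? ⟨x⟩ "stage") ++ '|' :: pvFmt (PySem.Dict.get? ⟨x⟩ "metric")) = false := by
        rw [← Bool.not_eq_true]; intro c; exact hx ((pvSetContains _ _).mp c)
      simp only [hc, Bool.false_eq_true, if_false, ih, pvDD_cons_not_mem hx]
      rw [pvDD_seen_congr pvAKey xs (s₂ := pvAKey x :: seen)
          (fun k => by
            rw [PySem.Set.mem_add, List.mem_cons]
            exact or_comm)]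
      simp [List.append_assoc]

-- Python's tuple-keyed sort is a sort by the lexicographic key
lemma pvSorted2_eq {A K1 K2 : Type} [LinearOrder K1] [LinearOrder K2]
    (xs : List A) (k1 : A → K1) (k2 : A → K2) :
    PySem.List.sorted2 xs k1 k2 = PySem.List.sorted xs (fun x => toLex (k1 x, k2 x)) := by
  unfold PySem.List.sorted2
  rw [PySem.List.sorted_eq_foldl_insertBy]
  show List.foldl (fun acc x => PySem.List.insertBy
      (fun a b => decide (k1 a < k1 b) || !decide (k1 b < k1 a) && decide (k2 a < k2 b)) x acc) [] xs = _
  congr 1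
  funext acc x
  congr 1
  funext a b
  rcases lt_trichotomy (k1 a) (k1 b) with h | h | h
  · simp [h, Prod.Lex.toLex_lt_toLex]
  · simp [h, Prod.Lex.toLex_lt_toLex]
  · simp [Prod.Lex.toLex_lt_toLex, lt_asymm h, ne_of_gt h]
    exact fun hab => absurd hab (not_le_of_gt h)

-- stability of the insertion sort: a key class is untouched
lemma pvFilter_insertBy {A K : Type} [LinearOrder K] (key : A → K) (k : K) (p : A → Bool)
    (hp : ∀ y, p y = true ↔ key y = k) (x : A) (acc : List A)
    (h : acc.Pairwise (fun a b => key a ≤ key b)) :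
    (PySem.List.insertBy (fun a b => decide (key a < key b)) x acc).filter p =
      if key x = k then acc.filter p ++ [x] else acc.filter p := by
  induction acc with
  | nil =>
    by_cases hk : key x = k <;> simp [PySem.List.insertBy, hp, hk]
  | cons y ys ih =>
    obtain ⟨hy, hys⟩ := List.pairwise_cons.mp h
    by_cases hxy : key x < key y
    · have hins : PySem.List.insertBy (fun a b => decide (key a < key b)) x (y :: ys) = x :: y :: ys := by
        simp [PySem.List.insertBy, hxy]
      rw [hins]
      by_cases hk : key x = k
      · have hnil : (y :: ys).filter p = [] := by
          refine List.filter_eq_nil_iff.mpr ?_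
          intro z hz
          have hle : key y ≤ key z := by
            rcases List.mem_cons.mp hz with rfl | hz'
            · exact le_refl _
            · exact hy z hz'
          rw [hp z]
          intro c
          have hlt := lt_of_lt_of_le hxy hle
          rw [c, ← hk] at hlt
          exact lt_irrefl _ hlt
        simp [hp, hk, hnil]
      · simp [List.filter_cons, hp, hk]
    · have hins : PySem.List.insertBy (fun a b => decide (key a < key b)) x (y :: ys) =
          y :: PySem.List.insertBy (fun a b => decide (key a < key b)) x ys := by
        simp [PySem.List.insertBy, hxy]
      rw [hins, List.filter_cons, ih hys, List.filter_cons]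
      by_cases hk : key x = k <;> by_cases hyk : key y = k <;>
        simp [hp, hk, hyk]

lemma pvFilter_sorted {A K : Type} [LinearOrder K] (key : A → K) (k : K) (p : A → Bool)
    (hp : ∀ y, p y = true ↔ key y = k) (cs : List A) :
    (PySem.List.sorted cs key).filter p = cs.filter p := by
  induction cs using List.reverseRecOn with
  | nil => rfl
  | append_singleton cs x ih =>
    rw [PySem.List.sorted_eq_foldl_insertBy, List.foldl_append, List.foldl_cons, List.foldl_nil,
        ← PySem.List.sorted_eq_foldl_insertBy,
        pvFilter_insertBy key k p hp x _ (PySem.List.sorted_pairwise cs key),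
        List.filter_append]
    by_cases hk : key x = k <;> simp [hp, hk, ih]

-- first-occurrence dedupe commutes with the stable sort
lemma pvDD_sorted {A K : Type} [LinearOrder K] [DecidableEq K] (f : A → K) (cs : List A) :
    pvDD f (PySem.List.sorted cs f) [] = PySem.List.sorted (pvDD f cs []) f := by
  refine (PySem.List.sorted_eq_of_perm_of_pairwise_lt _ _ _ ?_ ?_).symm
  · rw [List.perm_ext_iff_of_nodup (pvDD_nodup f _ []) (pvDD_nodup f _ [])]
    intro e
    rw [pvMem_pvDD, pvMem_pvDD, pvFilter_sorted f (f e) (fun x => decide (f x = f e)) (fun y => by simp) cs]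
  · have h1 := (PySem.List.sorted_pairwise cs f).sublist (pvDD_sublist f (PySem.List.sorted cs f) [])
    have h2 := pvDD_pairwise_ne f (PySem.List.sorted cs f) []
    exact (h1.and h2).imp (fun hab => lt_of_le_of_ne hab.1 hab.2)

-- the f-string key and the tuple key agree on classified entries
lemma pvApp_iff (s ma mb : String) :
    s.toList ++ '|' :: ma.toList = s.toList ++ '|' :: mb.toList ↔ ma = mb := by
  constructor
  · intro h
    have h2 := List.append_cancel_left h
    injection h2 with _ h2
    exact String.toList_inj.mp h2
  · intro h; rw [h]

lemma pvPrefix_ne {c1 c2 : Char} {t1 t2 ma mb : List Char} (hne : c1 ≠ c2) :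
    (c1 :: t1) ++ '|' :: ma ≠ (c2 :: t2) ++ '|' :: mb := by
  simp [hne]

lemma pvStage_cases {e : List (String × String)} (h : pvInv e) :
    ∃ o m s, pvK e = (o, m) ∧ pvAKey e = s.toList ++ '|' :: m.toList ∧
      ((o, s) = ((1 : Int), "resource_pressure") ∨ (o, s) = ((2 : Int), "capacity_saturation") ∨
        (o, s) = ((3 : Int), "user_visible_failure")) := by
  obtain ⟨m, l, v, n, o, s, r, hg, rfl⟩ := h
  have hm := pvInfo_mem hg
  refine ⟨o, m, s, ?_, ?_, hm.1⟩
  · rw [pvK, pvKey1, pvKey2, (pvGetD_field s m l v n r).1, (pvGetD_field s m l v n r).2.1, hm.2]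
  · rw [pvAKey, (pvGetD_field s m l v n r).2.2.1, (pvGetD_field s m l v n r).2.2.2]
    rfl

lemma pvSame (s : String) (o : Int) (ma mb : String) :
    (s.toList ++ '|' :: ma.toList = s.toList ++ '|' :: mb.toList) ↔ ((o, ma) = (o, mb)) := by
  constructor
  · intro h; rw [(pvApp_iff s ma mb).mp h]
  · intro h; injection h with _ h2; rw [h2]

lemma pvCross {s1 s2 : String} {c1 c2 : Char} {t1 t2 : List Char} {o1 o2 : Int} (ma mb : String)
    (hs1 : s1.toList = c1 :: t1) (hs2 : s2.toList = c2 :: t2) (hcne : c1 ≠ c2) (hone : o1 ≠ o2) :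
    (s1.toList ++ '|' :: ma.toList = s2.toList ++ '|' :: mb.toList) ↔ ((o1, ma) = (o2, mb)) := by
  apply iff_of_false
  · rw [hs1, hs2]; exact pvPrefix_ne hcne
  · intro h; injection h with h1 _; exact hone h1

lemma pvAKey_iff {a b : List (String × String)} (ha : pvInv a) (hb : pvInv b) :
    pvAKey a = pvAKey b ↔ pvK a = pvK b := by
  obtain ⟨oa, ma, sa, hka, hAa, hsa⟩ := pvStage_cases ha
  obtain ⟨ob, mb, sb, hkb, hAb, hsb⟩ := pvStage_cases hb
  rw [hka, hkb, hAa, hAb]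
  have hr : "resource_pressure".toList = 'r' :: "esource_pressure".toList := by decide
  have hc : "capacity_saturation".toList = 'c' :: "apacity_saturation".toList := by decide
  have hu : "user_visible_failure".toList = 'u' :: "ser_visible_failure".toList := by decide
  rcases hsa with h1 | h1 | h1 <;> rcases hsb with h2 | h2 | h2 <;>
    (injection h1 with h1a h1b; injection h2 with h2a h2b;
     subst h1a; subst h1b; subst h2a; subst h2b)
  · exact pvSame _ _ ma mb
  · exact pvCross ma mb hr hc (by decide) (by decide)
  · exact pvCross ma mb hr hu (by decide) (by decide)
  · exact pvCross ma mb hc hr (by decide) (by decide)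
  · exact pvSame _ _ ma mb
  · exact pvCross ma mb hc hu (by decide) (by decide)
  · exact pvCross ma mb hu hr (by decide) (by decide)
  · exact pvCross ma mb hu hc (by decide) (by decide)
  · exact pvSame _ _ ma mb

-- the two bridging facts used in the final assembly
lemma pvK_iff_lex (a b : List (String × String)) : pvK a = pvK b ↔ pvLex a = pvLex b :=
  ⟨fun h => congrArg toLex h, fun h => toLex.injective h⟩

lemma pvBRead (cs : List (List (String × String))) (d : PySem.Dict (Int × String) (List (String × String)))
    (hd : d.items = (pvDD pvK cs []).map (fun e => (pvK e, e))) :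
    (PySem.List.sorted2 d.keys (fun k => k.1) (fun k => k.2)).map (fun k => d.getD k []) =
      PySem.List.sorted (pvDD pvLex cs []) pvLex := by
  have hKL' : pvDD pvK cs [] = pvDD pvLex cs [] := by
    simpa using pvDD_key_iff (f := pvK) (g := pvLex) cs [] (fun a b _ _ => pvK_iff_lex a b)
  have hds : d.keys = (pvDD pvLex cs []).map pvK := by
    rw [show d.keys = d.items.map (·.1) from rfl, hd, hKL', List.map_map]
    rfl
  have hnd : ((pvDD pvLex cs []).map pvK).Nodup :=
    List.pairwise_map.mpr ((pvDD_pairwise_ne pvLex cs []).imp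
      (fun hne c => hne (congrArg toLex c)))
  have hsort : PySem.List.sorted ((pvDD pvLex cs []).map pvK) (fun k => toLex k) =
      (PySem.List.sorted (pvDD pvLex cs []) pvLex).map pvK := by
    refine PySem.List.eq_of_perm_of_pairwise_le_of_injective (fun p : Int × String => toLex p)
      (fun p q h => toLex.injective h) ?_ ?_ ?_
    · exact (PySem.List.sorted_perm _ _ false).trans
        ((PySem.List.sorted_perm (pvDD pvLex cs []) pvLex false).map pvK).symm
    · exact PySem.List.sorted_pairwise _ _
    · exact List.pairwise_map.mpr (PySem.List.sorted_pairwise (pvDD pvLex cs []) pvLex)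
  have hget : ∀ e ∈ PySem.List.sorted (pvDD pvLex cs []) pvLex, d.getD (pvK e) [] = e := by
    intro e he
    have he' : e ∈ pvDD pvLex cs [] := (PySem.List.mem_sorted _ _ _ e).mp he
    have hmemi : (pvK e, e) ∈ d.items := by
      rw [hd, hKL']; exact List.mem_map_of_mem he'
    exact PySem.Dict.getD_of_mem_items d hmemi (by rw [hds]; exact hnd) []
  rw [hds, pvSorted2_eq, show (fun k : Int × String => toLex (k.1, k.2)) = (fun k : Int × String => toLex k) from rfl,
      hsort, List.map_map]
  refine Eq.trans (List.map_congr_left (g := fun e => e) (fun e he => hget e he)) ?_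
  exact List.map_id' _

lemma pvFinal (signals : List (List (String × String))) :
    build_metric_causal_chain_py signals = build_metric_causal_chain_py_alt signals := by
  have hItems := pvChosenEq signals PySem.Dict.empty
  rw [show (PySem.Dict.empty : PySem.Dict (Int × String) (List (String × String))).items = [] from rfl,
      show (PySem.Dict.empty : PySem.Dict (Int × String) (List (String × String))).keys = [] from rfl,
      List.nil_append] at hItems
  have hKL : pvDD pvK (signals.filterMap pvF) [] = pvDD pvLex (signals.filterMap pvF) [] := by
    simpa using pvDD_key_iff (f := pvK) (g := pvLex) (signals.filterMap pvF) []
      (fun a b _ _ => pvK_iff_lex a b)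
  unfold build_metric_causal_chain_py build_metric_causal_chain_py_alt
  rw [pvChainEq signals [], List.nil_append]
  by_cases hcs : List.filterMap pvF signals = []
  · simp [hcs, PySem.Dict.keys, hItems, PySem.List.sorted2, PySem.List.slice, pvDD]
  · rw [if_neg hcs]
    simp only []
    rw [pvDedupEq _ [] PySem.Set.empty, List.nil_append]
    rw [show (fun it => PySem.Dict.getD pvStageOrder (PySem.Dict.getD ⟨it⟩ "stage" "") 99) = pvKey1 from rfl,
        show (fun it => PySem.Dict.getD (⟨it⟩ : PySem.Dict String String) "metric" "") = pvKey2 from rfl,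
        pvSorted2_eq _ pvKey1 pvKey2,
        show (fun x => toLex (pvKey1 x, pvKey2 x)) = pvLex from rfl]
    rw [show pvDD pvAKey (PySem.List.sorted (List.filterMap pvF signals) pvLex) PySem.Set.empty =
          pvDD pvLex (PySem.List.sorted (List.filterMap pvF signals) pvLex) PySem.Set.empty from by
      simpa using pvDD_key_iff (f := pvAKey) (g := pvLex)
        (PySem.List.sorted (List.filterMap pvF signals) pvLex) []
        (fun a b ha hb => by
          have ha' : pvInv a := pvInv_of_mem ((PySem.List.mem_sorted (List.filterMap pvF signals) pvLex false a).mp (by simpa using ha))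
          have hb' : pvInv b := pvInv_of_mem ((PySem.List.mem_sorted (List.filterMap pvF signals) pvLex false b).mp (by simpa using hb))
          exact (pvAKey_iff ha' hb').trans (pvK_iff_lex a b))]
    rw [show pvDD pvLex (PySem.List.sorted (List.filterMap pvF signals) pvLex) PySem.Set.empty =
          PySem.List.sorted (pvDD pvLex (List.filterMap pvF signals) PySem.Set.empty) pvLex from
      pvDD_sorted pvLex (List.filterMap pvF signals)]
    rw [pvBRead (List.filterMap pvF signals) _ hItems]
    rfl


-- ===== VERDICT (by name: the statement is the Claim_ definition above) =====
theorem build_metric_causal_chain_py_spec : Claim_equal_build_metric_causal_chain_py := by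
  intro signals _
  exact pvFinal signals
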